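-- pv_equiv track=rewrite | github.com/inducer/relate | course/latex/utils.py | replace_latex_space_seperator
-- ===== SOURCE A (Python) =====
-- def replace_latex_space_seperator(s):
--     """
--     "{{", "}}", "{%", %}", "{#" and "#}" are used in jinja
--     template, so we have to put spaces between those
--     characters in latex source in the latex macro.
--     To compile the source, we are now removing the spaces.
--     """
--     pattern_list = [
--         r'{ {',
--         r'} }',
--         r'{ #',
--         r'# }',
--         r'{ %',
--         r'% }'
--         ]
--     for pattern in pattern_list:
--         while pattern in s:
--             s = s.replace(pattern, pattern.replace(" ", ""))
--
--     return s
-- ===== SOURCE B (Python) =====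
-- def replace_latex_space_seperator(s):
--     """Single left-to-right pass: drop each space whose immediate neighbours
--     form one of the jinja delimiter pairs, instead of repeatedly scanning
--     and replacing whole patterns."""
--     valid = {('{', '{'), ('}', '}'), ('{', '#'), ('#', '}'), ('{', '%'), ('%', '}')}
--     out = []
--     i = 0
--     n = len(s)
--     while i < n:
--         out.append(s[i])
--         if i + 2 < n and s[i + 1] == ' ' and (s[i], s[i + 2]) in valid:
--             i += 2
--         else:
--             i += 1
--     return ''.join(out)
-- ===== Notes on version B (the rewrite author's own statement) =====
-- stated objective: alternative
-- what changed: Replaces the six sequential while/str.replace fixpoint loops by one left-to-right pass that drops each space whose immediate neighbours form a jinja delimiter pair.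
import Mathlib
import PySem

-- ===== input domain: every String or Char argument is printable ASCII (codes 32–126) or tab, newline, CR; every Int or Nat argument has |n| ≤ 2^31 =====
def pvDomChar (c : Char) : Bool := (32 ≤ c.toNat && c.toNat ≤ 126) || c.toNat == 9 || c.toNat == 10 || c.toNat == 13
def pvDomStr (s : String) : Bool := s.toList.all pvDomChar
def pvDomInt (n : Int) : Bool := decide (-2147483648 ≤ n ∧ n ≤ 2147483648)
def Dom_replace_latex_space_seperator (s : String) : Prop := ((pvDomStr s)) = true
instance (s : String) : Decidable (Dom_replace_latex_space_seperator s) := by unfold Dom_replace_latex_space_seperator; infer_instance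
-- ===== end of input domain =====

-- B replaces A's six sequential while/str.replace fixpoint loops by one
-- left-to-right pass dropping each space whose neighbours form a delimiter pair
-- (alternative single-pass algorithm; no speed claim).

-- ===== PORT A =====
-- A's patterns are all of the form "x y"; the while loop is ported as a
-- fuel-bounded recursion (the fuel only makes the same computation total:
-- each replace strictly shortens the string, proved below, so the fuel
-- s.length + 1 is never exhausted).
def pvPattern (x y : Char) : String := String.ofList [x, ' ', y]

-- 'while pattern in s: s = s.replace(pattern, pattern.replace(" ", ""))'
def pvWhileReplaceF (x y : Char) : Nat → String → String
  | 0, s => s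
  | fuel + 1, s =>
    if PySem.Str.isIn (pvPattern x y) s = true then
      pvWhileReplaceF x y fuel
        (PySem.Str.replace s (pvPattern x y) (PySem.Str.replace (pvPattern x y) " " ""))
    else s

def pvWhileReplace (x y : Char) (s : String) : String :=
  pvWhileReplaceF x y (s.toList.length + 1) s

def replace_latex_space_seperator (s : String) : String :=
  [('{','{'), ('}','}'), ('{','#'), ('#','}'), ('{','%'), ('%','}')].foldl
    (fun s p => pvWhileReplace p.1 p.2 s) s

-- ===== PORT B =====
def pvValid (a b : Char) : Bool :=
  (a == '{' && b == '{') || (a == '}' && b == '}') || (a == '{' && b == '#') ||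
  (a == '#' && b == '}') || (a == '{' && b == '%') || (a == '%' && b == '}')

-- Source B's while loop over the index i, as recursion over the remaining suffix:
-- emit s[i]; skip s[i+1] when it is a space flanked by a valid pair.
-- (Fuel-bounded for totality only; each step consumes at least one character,
-- so fuel = length never runs out.)
def pvOnePassF : Nat → List Char → List Char
  | 0, l => l
  | fuel + 1, a :: d :: e :: t =>
    if d = ' ' ∧ pvValid a e then a :: pvOnePassF fuel (e :: t)
    else a :: pvOnePassF fuel (d :: e :: t)
  | _ + 1, l => l

def replace_latex_space_seperator_alt (s : String) : String :=
  String.ofList (pvOnePassF s.toList.length s.toList)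

-- ===== PRECONDITION & SPEC =====
def Spec_replace_latex_space_seperator (s : String) (out : String) : Prop := out = replace_latex_space_seperator_alt s
instance (s : String) (out : String) : Decidable (Spec_replace_latex_space_seperator s out) := by unfold Spec_replace_latex_space_seperator; infer_instance

-- ===== CLAIM (what is proved, stated in full; the proofs are below) =====
def Claim_equal_replace_latex_space_seperator : Prop := ∀ (s : String), Dom_replace_latex_space_seperator s → Spec_replace_latex_space_seperator s (replace_latex_space_seperator s)

-- ===== LEMMAS AND PROOFS =====

-- Characterisation of Python's str.replace (leftmost, non-overlapping
-- replacement of old = o :: os), fuel-bounded.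
def pvRepGF (o : Char) (os new : List Char) : Nat → List Char → List Char
  | 0, l => l
  | _ + 1, [] => []
  | fuel + 1, c :: t =>
    if (o :: os) <+: (c :: t) then new ++ pvRepGF o os new fuel (t.drop os.length)
    else c :: pvRepGF o os new fuel t

theorem pvRepGF_nil (o : Char) (os new : List Char) (f : Nat) :
    pvRepGF o os new f [] = [] := by cases f <;> rfl

theorem pvRepGF_cons (o : Char) (os new : List Char) (f : Nat) (c : Char) (t : List Char) :
    pvRepGF o os new (f + 1) (c :: t) =
      if (o :: os) <+: (c :: t) then new ++ pvRepGF o os new f (t.drop os.length)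
      else c :: pvRepGF o os new f t := rfl

theorem pvRepGF_congr (o : Char) (os new : List Char) :
    ∀ (f₁ f₂ : Nat) (l : List Char), l.length ≤ f₁ → l.length ≤ f₂ →
      pvRepGF o os new f₁ l = pvRepGF o os new f₂ l := by
  intro f₁
  induction f₁ with
  | zero =>
    intro f₂ l h1 _
    have : l = [] := List.length_eq_zero_iff.mp (Nat.le_zero.mp h1)
    subst this
    rw [pvRepGF_nil, pvRepGF_nil]
  | succ n ih =>
    intro f₂ l h1 h2
    cases l with
    | nil => rw [pvRepGF_nil, pvRepGF_nil]
    | cons c t =>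
      cases f₂ with
      | zero => simp at h2
      | succ g =>
        rw [pvRepGF_cons, pvRepGF_cons]
        simp only [List.length_cons] at h1 h2
        by_cases hp : (o :: os) <+: (c :: t)
        · rw [if_pos hp, if_pos hp]
          congr 1
          exact ih g (t.drop os.length) (by simp only [List.length_drop]; omega)
            (by simp only [List.length_drop]; omega)
        · rw [if_neg hp, if_neg hp]
          congr 1
          exact ih g t (by omega) (by omega)

def pvRepG (o : Char) (os new : List Char) (l : List Char) : List Char :=
  pvRepGF o os new l.length l

theorem pvRepG_nil (o : Char) (os new : List Char) : pvRepG o os new [] = [] := rfl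

theorem pvRepG_cons (o : Char) (os new : List Char) (c : Char) (t : List Char) :
    pvRepG o os new (c :: t) =
      if (o :: os) <+: (c :: t) then new ++ pvRepG o os new (t.drop os.length)
      else c :: pvRepG o os new t := by
  unfold pvRepG
  simp only [List.length_cons]
  rw [pvRepGF_cons]
  by_cases hp : (o :: os) <+: (c :: t)
  · rw [if_pos hp, if_pos hp]
    congr 1
    exact pvRepGF_congr o os new t.length (t.drop os.length).length (t.drop os.length)
      (by simp only [List.length_drop]; omega) (le_refl _)
  · rw [if_neg hp, if_neg hp]

theorem pvRepG_go (o : Char) (os new : List Char) :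
    ∀ (fuel : Nat) (l acc : List Char), l.length ≤ fuel →
      PySem.Chars.replace.go (o :: os) new fuel l acc = acc.reverse ++ pvRepG o os new l := by
  intro fuel
  induction fuel with
  | zero =>
    intro l acc h
    have hl : l = [] := List.length_eq_zero_iff.mp (Nat.le_zero.mp h)
    subst hl
    simp [PySem.Chars.replace.go, pvRepG_nil]
  | succ n ih =>
    intro l acc h
    cases l with
    | nil => simp [PySem.Chars.replace.go, pvRepG_nil]
    | cons c t =>
      by_cases hp : (o :: os) <+: (c :: t)
      · have hpre : (o :: os).isPrefixOf (c :: t) = true := List.isPrefixOf_iff_prefix.mpr hp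
        have hlen : os.length ≤ t.length := by
          have := hp.length_le; simpa using this
        have hd : (t.drop os.length).length ≤ n := by
          simp only [List.length_drop]
          simp only [List.length_cons] at h
          omega
        rw [PySem.Chars.replace.go]
        rw [if_pos hpre]
        simp only [List.length_cons, List.drop_succ_cons]
        rw [ih _ _ hd]
        rw [pvRepG_cons, if_pos hp]
        simp [List.append_assoc]
      · have hpre : (o :: os).isPrefixOf (c :: t) = false := by
          rw [Bool.eq_false_iff]
          intro hb
          exact hp (List.isPrefixOf_iff_prefix.mp hb)
        have ht : t.length ≤ n := by
          simp only [List.length_cons] at h; omega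
        rw [PySem.Chars.replace.go]
        rw [if_neg (by simp [hpre])]
        rw [ih _ _ ht]
        rw [pvRepG_cons, if_neg hp]
        simp

theorem pvReplace_eq (o : Char) (os new l : List Char) :
    PySem.Chars.replace l (o :: os) new = pvRepG o os new l := by
  rw [PySem.Chars.replace.eq_def]
  simp only [List.isEmpty_cons, if_neg Bool.false_ne_true]
  simpa using pvRepG_go o os new l.length l [] (le_refl _)

theorem pvRepG_len_le (o : Char) (os new : List Char) (hn : new.length ≤ os.length + 1) :
    ∀ (k : Nat) (l : List Char), l.length ≤ k → (pvRepG o os new l).length ≤ l.length := by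
  intro k
  induction k with
  | zero =>
    intro l h
    have hl : l = [] := List.length_eq_zero_iff.mp (Nat.le_zero.mp h)
    subst hl; simp [pvRepG_nil]
  | succ n ih =>
    intro l h
    cases l with
    | nil => simp [pvRepG_nil]
    | cons c t =>
      simp only [List.length_cons] at h
      by_cases hp : (o :: os) <+: (c :: t)
      · have hlen : os.length ≤ t.length := by have := hp.length_le; simpa using this
        have hrec := ih (t.drop os.length) (by simp only [List.length_drop]; omega)
        rw [pvRepG_cons, if_pos hp]
        simp only [List.length_append, List.length_cons, List.length_drop] at hrec ⊢
        omega
      · have hrec := ih t (by omega)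
        rw [pvRepG_cons, if_neg hp]
        simp only [List.length_cons]
        omega

theorem pvRepG_len_lt (o : Char) (os new : List Char) (hn : new.length < os.length + 1) :
    ∀ (k : Nat) (l : List Char), l.length ≤ k →
      (o :: os) <:+: l → (pvRepG o os new l).length < l.length := by
  intro k
  induction k with
  | zero =>
    intro l h hocc
    have hl : l = [] := List.length_eq_zero_iff.mp (Nat.le_zero.mp h)
    subst hl
    simp at hocc
  | succ n ih =>
    intro l h hocc
    cases l with
    | nil => simp at hocc
    | cons c t =>
      simp only [List.length_cons] at h
      by_cases hp : (o :: os) <+: (c :: t)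
      · have hlen : os.length ≤ t.length := by have := hp.length_le; simpa using this
        have hrec := pvRepG_len_le o os new (by omega) t.length (t.drop os.length)
          (by simp only [List.length_drop]; omega)
        rw [pvRepG_cons, if_pos hp]
        simp only [List.length_append, List.length_cons, List.length_drop] at hrec ⊢
        omega
      · have hocc' : (o :: os) <:+: t := by
          rcases List.infix_cons_iff.mp hocc with h1 | h2
          · exact absurd h1 hp
          · exact h2
        have hrec := ih t (by omega) hocc'
        rw [pvRepG_cons, if_neg hp]
        simp only [List.length_cons]
        omega

theorem pvReplaceStep_len (x y : Char) (s : String)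
    (h : PySem.Str.isIn (pvPattern x y) s = true) :
    (PySem.Str.replace s (pvPattern x y)
        (PySem.Str.replace (pvPattern x y) " " "")).toList.length < s.toList.length := by
  have hocc : [x, ' ', y] <:+: s.toList := by
    have := (PySem.Str.isIn_iff_infix (pvPattern x y) s).mp h
    simpa [pvPattern] using this
  have hnew : (PySem.Str.replace (pvPattern x y) " " "").toList.length < 3 := by
    rw [PySem.Str.toList_replace]
    have h1 : (" " : String).toList = [' '] := rfl
    have h2 : ("" : String).toList = [] := rfl
    have h3 : (pvPattern x y).toList = [x, ' ', y] := by simp [pvPattern]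
    rw [h1, h2, h3, pvReplace_eq]
    have := pvRepG_len_lt ' ' [] [] (by simp) 3 [x, ' ', y] (by simp) ⟨[x], [y], rfl⟩
    simpa using this
  rw [PySem.Str.toList_replace]
  have h3 : (pvPattern x y).toList = [x, ' ', y] := by simp [pvPattern]
  rw [h3, pvReplace_eq]
  exact pvRepG_len_lt x [' ', y] _ (by simpa using hnew) s.toList.length s.toList
    (le_refl _) hocc

theorem pvWhileReplaceF_step (x y : Char) (f : Nat) (s : String) :
    pvWhileReplaceF x y (f + 1) s =
      if PySem.Str.isIn (pvPattern x y) s = true then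
        pvWhileReplaceF x y f
          (PySem.Str.replace s (pvPattern x y) (PySem.Str.replace (pvPattern x y) " " ""))
      else s := rfl

theorem pvWhileReplaceF_congr (x y : Char) :
    ∀ (f₁ f₂ : Nat) (s : String), s.toList.length < f₁ → s.toList.length < f₂ →
      pvWhileReplaceF x y f₁ s = pvWhileReplaceF x y f₂ s := by
  intro f₁
  induction f₁ with
  | zero => intro f₂ s h1 _; omega
  | succ n ih =>
    intro f₂ s h1 h2
    cases f₂ with
    | zero => omega
    | succ g =>
      rw [pvWhileReplaceF_step, pvWhileReplaceF_step]
      by_cases hin : PySem.Str.isIn (pvPattern x y) s = true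
      · rw [if_pos hin, if_pos hin]
        have hlt := pvReplaceStep_len x y s hin
        exact ih g _ (by omega) (by omega)
      · rw [if_neg hin, if_neg hin]

-- the while loop's defining equation (the fuel is never exhausted)
theorem pvWhile_eq (x y : Char) (s : String) :
    pvWhileReplace x y s =
      if PySem.Str.isIn (pvPattern x y) s = true then
        pvWhileReplace x y
          (PySem.Str.replace s (pvPattern x y) (PySem.Str.replace (pvPattern x y) " " ""))
      else s := by
  unfold pvWhileReplace
  rw [pvWhileReplaceF_step]
  by_cases hin : PySem.Str.isIn (pvPattern x y) s = true
  · rw [if_pos hin, if_pos hin]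
    have hlt := pvReplaceStep_len x y s hin
    exact pvWhileReplaceF_congr x y _ _ _ (by omega) (by omega)
  · rw [if_neg hin, if_neg hin]

theorem pvOnePassF_nil (f : Nat) : pvOnePassF f [] = [] := by cases f <;> rfl
theorem pvOnePassF_one (f : Nat) (a : Char) : pvOnePassF f [a] = [a] := by cases f <;> rfl
theorem pvOnePassF_two (f : Nat) (a d : Char) : pvOnePassF f [a, d] = [a, d] := by
  cases f <;> rfl

theorem pvOnePassF_cons3 (f : Nat) (a d e : Char) (t : List Char) :
    pvOnePassF (f + 1) (a :: d :: e :: t) =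
      if d = ' ' ∧ pvValid a e then a :: pvOnePassF f (e :: t)
      else a :: pvOnePassF f (d :: e :: t) := rfl

theorem pvOnePassF_congr :
    ∀ (f₁ f₂ : Nat) (l : List Char), l.length ≤ f₁ → l.length ≤ f₂ →
      pvOnePassF f₁ l = pvOnePassF f₂ l := by
  intro f₁
  induction f₁ with
  | zero =>
    intro f₂ l h1 _
    have : l = [] := List.length_eq_zero_iff.mp (Nat.le_zero.mp h1)
    subst this
    rw [pvOnePassF_nil, pvOnePassF_nil]
  | succ n ih =>
    intro f₂ l h1 h2
    match l with
    | [] => rw [pvOnePassF_nil, pvOnePassF_nil]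
    | [a] => rw [pvOnePassF_one, pvOnePassF_one]
    | [a, d] => rw [pvOnePassF_two, pvOnePassF_two]
    | a :: d :: e :: t =>
      cases f₂ with
      | zero => simp at h2
      | succ g =>
        rw [pvOnePassF_cons3, pvOnePassF_cons3]
        simp only [List.length_cons] at h1 h2
        by_cases hc : d = ' ' ∧ pvValid a e = true
        · rw [if_pos hc, if_pos hc]
          congr 1
          exact ih g (e :: t) (by simp only [List.length_cons]; omega)
            (by simp only [List.length_cons]; omega)
        · rw [if_neg hc, if_neg hc]
          congr 1
          exact ih g (d :: e :: t) (by simp only [List.length_cons]; omega)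
            (by simp only [List.length_cons]; omega)

-- the one-pass on a list, with the canonical fuel
def pvOnePass (l : List Char) : List Char := pvOnePassF l.length l

theorem pvOnePass_nil : pvOnePass [] = [] := rfl
theorem pvOnePass_one (a : Char) : pvOnePass [a] = [a] := rfl
theorem pvOnePass_two (a d : Char) : pvOnePass [a, d] = [a, d] := rfl

theorem pvOnePass_cons3 (a d e : Char) (t : List Char) :
    pvOnePass (a :: d :: e :: t) =
      if d = ' ' ∧ pvValid a e then a :: pvOnePass (e :: t)
      else a :: pvOnePass (d :: e :: t) := by
  unfold pvOnePass
  simp only [List.length_cons]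
  rw [pvOnePassF_cons3]
  by_cases hc : d = ' ' ∧ pvValid a e = true
  · rw [if_pos hc, if_pos hc]
    congr 1
    exact pvOnePassF_congr (t.length + 1 + 1) (e :: t).length (e :: t)
      (by simp only [List.length_cons]; omega) (le_refl _)
  · rw [if_neg hc, if_neg hc]


theorem pvValid_cases {a b : Char} (h : pvValid a b = true) :
    (a = '{' ∧ b = '{') ∨ (a = '}' ∧ b = '}') ∨ (a = '{' ∧ b = '#') ∨
    (a = '#' ∧ b = '}') ∨ (a = '{' ∧ b = '%') ∨ (a = '%' ∧ b = '}') := by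
  revert h
  unfold pvValid
  simp only [Bool.or_eq_true, Bool.and_eq_true, beq_iff_eq]
  tauto

theorem pvValid_ne_space {a b : Char} (h : pvValid a b = true) : a ≠ ' ' ∧ b ≠ ' ' := by
  rcases pvValid_cases h with ⟨rfl, rfl⟩ | ⟨rfl, rfl⟩ | ⟨rfl, rfl⟩ | ⟨rfl, rfl⟩ |
    ⟨rfl, rfl⟩ | ⟨rfl, rfl⟩ <;> exact ⟨by decide, by decide⟩

-- dropping one removable space (base case: at the front)
theorem pvStep0 (a b : Char) (h : pvValid a b = true) (v : List Char) :
    pvOnePass (a :: ' ' :: b :: v) = pvOnePass (a :: b :: v) := by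
  have hb := (pvValid_ne_space h).2
  cases v with
  | nil =>
    rw [pvOnePass_cons3 a ' ' b []]
    rw [if_pos ⟨rfl, h⟩, pvOnePass_one, pvOnePass_two]
  | cons e t =>
    rw [pvOnePass_cons3 a ' ' b (e :: t), pvOnePass_cons3 a b e t]
    rw [if_pos ⟨rfl, h⟩, if_neg (fun hc => hb hc.1)]

-- dropping one removable space anywhere does not change the one-pass result
theorem pvStep (a b : Char) (h : pvValid a b = true) :
    ∀ (n : Nat) (u : List Char), u.length ≤ n → ∀ (v : List Char),
      pvOnePass (u ++ a :: ' ' :: b :: v) = pvOnePass (u ++ a :: b :: v) := by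
  have ha := (pvValid_ne_space h).1
  intro n
  induction n with
  | zero =>
    intro u hu v
    have : u = [] := List.length_eq_zero_iff.mp (Nat.le_zero.mp hu)
    subst this
    simpa using pvStep0 a b h v
  | succ n ih =>
    intro u hu v
    cases u with
    | nil => simpa using pvStep0 a b h v
    | cons c u' =>
      cases u' with
      | nil =>
        simp only [List.cons_append, List.nil_append]
        rw [pvOnePass_cons3 c a ' ' (b :: v), pvOnePass_cons3 c a b v]
        rw [if_neg (fun hc => ha hc.1), if_neg (fun hc => ha hc.1)]
        exact congrArg (c :: ·) (pvStep0 a b h v)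
      | cons d u'' =>
        by_cases hd : d = ' '
        · subst hd
          cases u'' with
          | nil =>
            simp only [List.cons_append, List.nil_append]
            rw [pvOnePass_cons3 c ' ' a (' ' :: b :: v), pvOnePass_cons3 c ' ' a (b :: v)]
            by_cases hca : pvValid c a = true
            · rw [if_pos ⟨rfl, hca⟩, if_pos ⟨rfl, hca⟩]
              exact congrArg (c :: ·) (pvStep0 a b h v)
            · rw [if_neg (fun hc => hca hc.2), if_neg (fun hc => hca hc.2)]
              refine congrArg (c :: ·) ?_
              have hlen : ([' '] : List Char).length ≤ n := by
                simp only [List.length_cons, List.length_nil] at hu ⊢; omega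
              simpa only [List.cons_append, List.nil_append] using ih [' '] hlen v
          | cons e u''' =>
            simp only [List.cons_append]
            rw [pvOnePass_cons3 c ' ' e (u''' ++ a :: ' ' :: b :: v),
                pvOnePass_cons3 c ' ' e (u''' ++ a :: b :: v)]
            by_cases hce : pvValid c e = true
            · rw [if_pos ⟨rfl, hce⟩, if_pos ⟨rfl, hce⟩]
              refine congrArg (c :: ·) ?_
              have hlen : (e :: u''').length ≤ n := by
                simp only [List.length_cons] at hu ⊢; omega
              simpa only [List.cons_append] using ih (e :: u''') hlen v
            · rw [if_neg (fun hc => hce hc.2), if_neg (fun hc => hce hc.2)]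
              refine congrArg (c :: ·) ?_
              have hlen : (' ' :: e :: u''').length ≤ n := by
                simp only [List.length_cons] at hu ⊢; omega
              simpa only [List.cons_append] using ih (' ' :: e :: u''') hlen v
        · cases u'' with
          | nil =>
            simp only [List.cons_append, List.nil_append]
            rw [pvOnePass_cons3 c d a (' ' :: b :: v), pvOnePass_cons3 c d a (b :: v)]
            rw [if_neg (fun hc => hd hc.1), if_neg (fun hc => hd hc.1)]
            refine congrArg (c :: ·) ?_
            have hlen : ([d] : List Char).length ≤ n := by
              simp only [List.length_cons, List.length_nil] at hu ⊢; omega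
            simpa only [List.cons_append, List.nil_append] using ih [d] hlen v
          | cons e u''' =>
            simp only [List.cons_append]
            rw [pvOnePass_cons3 c d e (u''' ++ a :: ' ' :: b :: v),
                pvOnePass_cons3 c d e (u''' ++ a :: b :: v)]
            rw [if_neg (fun hc => hd hc.1), if_neg (fun hc => hd hc.1)]
            refine congrArg (c :: ·) ?_
            have hlen : (d :: e :: u''').length ≤ n := by
              simp only [List.length_cons] at hu ⊢; omega
            simpa only [List.cons_append] using ih (d :: e :: u''') hlen v

-- a whole replace pass of one pattern does not change the one-pass result
theorem pvRep_onepass (x y : Char) (h : pvValid x y = true) :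
    ∀ (n : Nat) (l : List Char), l.length ≤ n → ∀ (u : List Char),
      pvOnePass (u ++ pvRepG x [' ', y] [x, y] l) = pvOnePass (u ++ l) := by
  intro n
  induction n with
  | zero =>
    intro l hl u
    have : l = [] := List.length_eq_zero_iff.mp (Nat.le_zero.mp hl)
    subst this
    simp [pvRepG_nil]
  | succ n ih =>
    intro l hl u
    cases l with
    | nil => simp [pvRepG_nil]
    | cons c t =>
      by_cases hp : (x :: [' ', y]) <+: (c :: t)
      · obtain ⟨hcx, hp2⟩ := List.cons_prefix_cons.mp hp
        subst hcx
        cases t with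
        | nil => simp at hp2
        | cons d t' =>
          obtain ⟨hd, hp3⟩ := List.cons_prefix_cons.mp hp2
          subst hd
          cases t' with
          | nil => simp at hp3
          | cons e t'' =>
            obtain ⟨he, _⟩ := List.cons_prefix_cons.mp hp3
            subst he
            have hrw : pvRepG x [' ', y] [x, y] (x :: ' ' :: y :: t'') =
                x :: y :: pvRepG x [' ', y] [x, y] t'' := by
              rw [pvRepG_cons, if_pos hp]
              rfl
            rw [hrw]
            have h1 : pvOnePass (u ++ x :: y :: pvRepG x [' ', y] [x, y] t'')
                = pvOnePass (u ++ x :: y :: t'') := by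
              have := ih t'' (by simp only [List.length_cons] at hl; omega) (u ++ [x, y])
              simpa [List.append_assoc] using this
            rw [h1]
            have := pvStep x y h u.length u (le_refl _) t''
            rw [← this]
      · have hrw : pvRepG x [' ', y] [x, y] (c :: t) =
            c :: pvRepG x [' ', y] [x, y] t := by
          rw [pvRepG_cons, if_neg hp]
        rw [hrw]
        have := ih t (by simp only [List.length_cons] at hl; omega) (u ++ [c])
        simpa [List.append_assoc] using this

theorem pvRepG_head (x y : Char) (l : List Char) :
    (pvRepG x [' ', y] [x, y] l).head? = l.head? := by
  cases l with
  | nil => rw [pvRepG_nil]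
  | cons c t =>
    rw [pvRepG_cons]
    by_cases hp : (x :: [' ', y]) <+: (c :: t)
    · rw [if_pos hp]
      have hcx : x = c := (List.cons_prefix_cons.mp hp).1
      simp [hcx]
    · rw [if_neg hp]
      simp

-- a prefix [' ', y'] of a replaced string forces the same prefix in the source
theorem pvSpacePrefix (x y y' : Char) (hx : x ≠ ' ') :
    ∀ t : List Char, [' ', y'] <+: pvRepG x [' ', y] [x, y] t →
      ∃ t₃, t = ' ' :: y' :: t₃ := by
  intro t hpre
  have hhead : t.head? = some ' ' := by
    rw [← pvRepG_head x y t]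
    rcases hpre with ⟨r, hr⟩
    rw [← hr]
    rfl
  cases t with
  | nil => simp at hhead
  | cons c t'' =>
    have hc : c = ' ' := by simpa using hhead
    subst hc
    have hnp : ¬ (x :: [' ', y]) <+: (' ' :: t'') := by
      intro hcontra
      exact hx (List.cons_prefix_cons.mp hcontra).1
    rw [pvRepG_cons, if_neg hnp] at hpre
    obtain ⟨-, hpre2⟩ := List.cons_prefix_cons.mp hpre
    have hhead2 : t''.head? = some y' := by
      rw [← pvRepG_head x y t'']
      rcases hpre2 with ⟨r, hr⟩
      rw [← hr]
      rfl
    cases t'' with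
    | nil => simp at hhead2
    | cons g t₃ =>
      have hg : g = y' := by simpa using hhead2
      subst hg
      exact ⟨t₃, rfl⟩

-- a replace pass creates no new occurrence of any pattern [x', ' ', y']
theorem pvRepG_infix_rev (x y x' y' : Char) (hx : x ≠ ' ') (hy : y ≠ ' ') :
    ∀ (n : Nat) (l : List Char), l.length ≤ n →
      [x', ' ', y'] <:+: pvRepG x [' ', y] [x, y] l → [x', ' ', y'] <:+: l := by
  intro n
  induction n with
  | zero =>
    intro l hl hq
    have : l = [] := List.length_eq_zero_iff.mp (Nat.le_zero.mp hl)
    subst this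
    rw [pvRepG_nil] at hq
    simpa using hq
  | succ n ih =>
    intro l hl hq
    cases l with
    | nil =>
      rw [pvRepG_nil] at hq
      simp at hq
    | cons c t =>
      by_cases hp : (x :: [' ', y]) <+: (c :: t)
      · obtain ⟨hcx, hp2⟩ := List.cons_prefix_cons.mp hp
        subst hcx
        cases t with
        | nil => simp at hp2
        | cons d t' =>
          obtain ⟨hd, hp3⟩ := List.cons_prefix_cons.mp hp2
          subst hd
          cases t' with
          | nil => simp at hp3
          | cons e t'' =>
            obtain ⟨he, _⟩ := List.cons_prefix_cons.mp hp3
            subst he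
            have hrw : pvRepG x [' ', y] [x, y] (x :: ' ' :: y :: t'') =
                x :: y :: pvRepG x [' ', y] [x, y] t'' := by
              rw [pvRepG_cons, if_pos hp]
              rfl
            rw [hrw] at hq
            rcases List.infix_cons_iff.mp hq with h1 | h2
            · obtain ⟨-, h1b⟩ := List.cons_prefix_cons.mp h1
              exact absurd (List.cons_prefix_cons.mp h1b).1.symm hy
            · rcases List.infix_cons_iff.mp h2 with h3 | h4
              · obtain ⟨hq1, h3b⟩ := List.cons_prefix_cons.mp h3
                obtain ⟨t₃, ht₃⟩ := pvSpacePrefix x y y' hx t'' h3b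
                subst hq1
                refine ⟨[x, ' '], t₃, ?_⟩
                rw [ht₃]
                rfl
              · have := ih t'' (by simp only [List.length_cons] at hl; omega) h4
                rcases this with ⟨s₁, s₂, hs⟩
                exact ⟨x :: ' ' :: y :: s₁, s₂, by rw [← hs]; rfl⟩
      · have hrw : pvRepG x [' ', y] [x, y] (c :: t) =
            c :: pvRepG x [' ', y] [x, y] t := by
          rw [pvRepG_cons, if_neg hp]
        rw [hrw] at hq
        rcases List.infix_cons_iff.mp hq with h1 | h2
        · obtain ⟨hcx', h1b⟩ := List.cons_prefix_cons.mp h1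
          obtain ⟨t₃, ht₃⟩ := pvSpacePrefix x y y' hx t h1b
          subst hcx'
          refine ⟨[], t₃, ?_⟩
          rw [ht₃]
          rfl
        · have := ih t (by simp only [List.length_cons] at hl; omega) h2
          rcases this with ⟨s₁, s₂, hs⟩
          exact ⟨c :: s₁, s₂, by rw [← hs]; rfl⟩

-- a string with no removable space is a fixpoint of the one-pass
theorem pvOnePass_fix :
    ∀ (n : Nat) (l : List Char), l.length ≤ n →
      (∀ a b : Char, pvValid a b = true → ¬ [a, ' ', b] <:+: l) → pvOnePass l = l := by
  intro n
  induction n with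
  | zero =>
    intro l hl _
    have : l = [] := List.length_eq_zero_iff.mp (Nat.le_zero.mp hl)
    subst this
    exact pvOnePass_nil
  | succ n ih =>
    intro l hl hno
    match l with
    | [] => exact pvOnePass_nil
    | [a] => exact pvOnePass_one a
    | [a, d] => exact pvOnePass_two a d
    | a :: d :: e :: t =>
      rw [pvOnePass_cons3]
      by_cases hc : d = ' ' ∧ pvValid a e = true
      · exfalso
        exact hno a e hc.2 ⟨[], t, by simp [hc.1]⟩
      · rw [if_neg hc]
        have hno' : ∀ a' b' : Char, pvValid a' b' = true → ¬ [a', ' ', b'] <:+: d :: e :: t := by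
          intro a' b' hv hin
          rcases hin with ⟨s₁, s₂, hs⟩
          exact hno a' b' hv ⟨a :: s₁, s₂, by rw [← hs]; rfl⟩
        have := ih (d :: e :: t) (by simp only [List.length_cons] at hl ⊢; omega) hno'
        rw [this]

theorem pvRepG_strip (x y : Char) (hx : x ≠ ' ') (hy : y ≠ ' ') :
    pvRepG ' ' [] [] [x, ' ', y] = [x, y] := by
  rw [pvRepG_cons, if_neg (fun hc => hx (List.cons_prefix_cons.mp hc).1.symm)]
  rw [pvRepG_cons, if_pos (by simp)]
  simp only [List.length_nil, List.drop_zero, List.nil_append]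
  rw [pvRepG_cons, if_neg (fun hc => hy (List.cons_prefix_cons.mp hc).1.symm)]
  rw [pvRepG_nil]

theorem pvPatternStrip (x y : Char) (hx : x ≠ ' ') (hy : y ≠ ' ') :
    (PySem.Str.replace (pvPattern x y) " " "").toList = [x, y] := by
  rw [PySem.Str.toList_replace]
  have h1 : (" " : String).toList = [' '] := rfl
  have h2 : ("" : String).toList = [] := rfl
  have h3 : (pvPattern x y).toList = [x, ' ', y] := by simp [pvPattern]
  rw [h1, h2, h3, pvReplace_eq]
  exact pvRepG_strip x y hx hy

theorem pvReplaceStep_toList (x y : Char) (hx : x ≠ ' ') (hy : y ≠ ' ') (s : String) :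
    (PySem.Str.replace s (pvPattern x y)
        (PySem.Str.replace (pvPattern x y) " " "")).toList
      = pvRepG x [' ', y] [x, y] s.toList := by
  rw [PySem.Str.toList_replace, pvPatternStrip x y hx hy]
  have h3 : (pvPattern x y).toList = [x, ' ', y] := by simp [pvPattern]
  rw [h3, pvReplace_eq]

theorem pvLoop_onepass (x y : Char) (h : pvValid x y = true) :
    ∀ (n : Nat) (s : String), s.toList.length ≤ n →
      pvOnePass (pvWhileReplace x y s).toList = pvOnePass s.toList := by
  obtain ⟨hx, hy⟩ := pvValid_ne_space h
  intro n
  induction n with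
  | zero =>
    intro s hs
    rw [pvWhile_eq]
    by_cases hin : PySem.Str.isIn (pvPattern x y) s = true
    · exfalso
      have := pvReplaceStep_len x y s hin
      omega
    · rw [if_neg hin]
  | succ n ih =>
    intro s hs
    rw [pvWhile_eq]
    by_cases hin : PySem.Str.isIn (pvPattern x y) s = true
    · rw [if_pos hin]
      have hlt := pvReplaceStep_len x y s hin
      rw [ih _ (by omega)]
      rw [pvReplaceStep_toList x y hx hy s]
      have := pvRep_onepass x y h s.toList.length s.toList (le_refl _) []
      simpa using this
    · rw [if_neg hin]

theorem pvLoop_no_pat (x y : Char) :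
    ∀ (n : Nat) (s : String), s.toList.length ≤ n →
      ¬ [x, ' ', y] <:+: (pvWhileReplace x y s).toList := by
  intro n
  induction n with
  | zero =>
    intro s hs hin
    rw [pvWhile_eq] at hin
    by_cases hc : PySem.Str.isIn (pvPattern x y) s = true
    · have := pvReplaceStep_len x y s hc
      omega
    · rw [if_neg hc] at hin
      apply hc
      rw [PySem.Str.isIn_iff_infix]
      simpa [pvPattern] using hin
  | succ n ih =>
    intro s hs hin
    rw [pvWhile_eq] at hin
    by_cases hc : PySem.Str.isIn (pvPattern x y) s = true
    · rw [if_pos hc] at hin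
      have hlt := pvReplaceStep_len x y s hc
      exact ih _ (by omega) hin
    · rw [if_neg hc] at hin
      apply hc
      rw [PySem.Str.isIn_iff_infix]
      simpa [pvPattern] using hin

theorem pvLoop_pres (x y x' y' : Char) (hx : x ≠ ' ') (hy : y ≠ ' ') :
    ∀ (n : Nat) (s : String), s.toList.length ≤ n →
      ¬ [x', ' ', y'] <:+: s.toList → ¬ [x', ' ', y'] <:+: (pvWhileReplace x y s).toList := by
  intro n
  induction n with
  | zero =>
    intro s hs hno hin
    rw [pvWhile_eq] at hin
    by_cases hc : PySem.Str.isIn (pvPattern x y) s = true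
    · have := pvReplaceStep_len x y s hc
      omega
    · rw [if_neg hc] at hin
      exact hno hin
  | succ n ih =>
    intro s hs hno hin
    rw [pvWhile_eq] at hin
    by_cases hc : PySem.Str.isIn (pvPattern x y) s = true
    · rw [if_pos hc] at hin
      have hlt := pvReplaceStep_len x y s hc
      have hno' : ¬ [x', ' ', y'] <:+:
          (PySem.Str.replace s (pvPattern x y)
            (PySem.Str.replace (pvPattern x y) " " "")).toList := by
        rw [pvReplaceStep_toList x y hx hy s]
        intro hq
        exact hno (pvRepG_infix_rev x y x' y' hx hy s.toList.length s.toList (le_refl _) hq)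
      exact ih _ (by omega) hno' hin
    · rw [if_neg hc] at hin
      exact hno hin

-- ===== VERDICT (by name: the statement is the Claim_ definition above) =====
theorem replace_latex_space_seperator_spec : Claim_equal_replace_latex_space_seperator := by
  unfold Claim_equal_replace_latex_space_seperator Spec_replace_latex_space_seperator
  intro s _
  simp only [replace_latex_space_seperator, List.foldl_cons, List.foldl_nil]
  set s1 := pvWhileReplace '{' '{' s with hs1
  set s2 := pvWhileReplace '}' '}' s1 with hs2
  set s3 := pvWhileReplace '{' '#' s2 with hs3
  set s4 := pvWhileReplace '#' '}' s3 with hs4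
  set s5 := pvWhileReplace '{' '%' s4 with hs5
  set s6 := pvWhileReplace '%' '}' s5 with hs6
  -- the one-pass value is preserved by each loop
  have e6 : pvOnePass s6.toList = pvOnePass s5.toList :=
    pvLoop_onepass '%' '}' (by decide) _ s5 (le_refl _)
  have e5 : pvOnePass s5.toList = pvOnePass s4.toList :=
    pvLoop_onepass '{' '%' (by decide) _ s4 (le_refl _)
  have e4 : pvOnePass s4.toList = pvOnePass s3.toList :=
    pvLoop_onepass '#' '}' (by decide) _ s3 (le_refl _)
  have e3 : pvOnePass s3.toList = pvOnePass s2.toList :=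
    pvLoop_onepass '{' '#' (by decide) _ s2 (le_refl _)
  have e2 : pvOnePass s2.toList = pvOnePass s1.toList :=
    pvLoop_onepass '}' '}' (by decide) _ s1 (le_refl _)
  have e1 : pvOnePass s1.toList = pvOnePass s.toList :=
    pvLoop_onepass '{' '{' (by decide) _ s (le_refl _)
  -- the final string contains none of the six patterns
  have n1 : ¬ ['{', ' ', '{'] <:+: s6.toList := by
    apply pvLoop_pres '%' '}' '{' '{' (by decide) (by decide) _ s5 (le_refl _)
    apply pvLoop_pres '{' '%' '{' '{' (by decide) (by decide) _ s4 (le_refl _)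
    apply pvLoop_pres '#' '}' '{' '{' (by decide) (by decide) _ s3 (le_refl _)
    apply pvLoop_pres '{' '#' '{' '{' (by decide) (by decide) _ s2 (le_refl _)
    apply pvLoop_pres '}' '}' '{' '{' (by decide) (by decide) _ s1 (le_refl _)
    exact pvLoop_no_pat '{' '{' _ s (le_refl _)
  have n2 : ¬ ['}', ' ', '}'] <:+: s6.toList := by
    apply pvLoop_pres '%' '}' '}' '}' (by decide) (by decide) _ s5 (le_refl _)
    apply pvLoop_pres '{' '%' '}' '}' (by decide) (by decide) _ s4 (le_refl _)
    apply pvLoop_pres '#' '}' '}' '}' (by decide) (by decide) _ s3 (le_refl _)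
    apply pvLoop_pres '{' '#' '}' '}' (by decide) (by decide) _ s2 (le_refl _)
    exact pvLoop_no_pat '}' '}' _ s1 (le_refl _)
  have n3 : ¬ ['{', ' ', '#'] <:+: s6.toList := by
    apply pvLoop_pres '%' '}' '{' '#' (by decide) (by decide) _ s5 (le_refl _)
    apply pvLoop_pres '{' '%' '{' '#' (by decide) (by decide) _ s4 (le_refl _)
    apply pvLoop_pres '#' '}' '{' '#' (by decide) (by decide) _ s3 (le_refl _)
    exact pvLoop_no_pat '{' '#' _ s2 (le_refl _)
  have n4 : ¬ ['#', ' ', '}'] <:+: s6.toList := by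
    apply pvLoop_pres '%' '}' '#' '}' (by decide) (by decide) _ s5 (le_refl _)
    apply pvLoop_pres '{' '%' '#' '}' (by decide) (by decide) _ s4 (le_refl _)
    exact pvLoop_no_pat '#' '}' _ s3 (le_refl _)
  have n5 : ¬ ['{', ' ', '%'] <:+: s6.toList := by
    apply pvLoop_pres '%' '}' '{' '%' (by decide) (by decide) _ s5 (le_refl _)
    exact pvLoop_no_pat '{' '%' _ s4 (le_refl _)
  have n6 : ¬ ['%', ' ', '}'] <:+: s6.toList :=
    pvLoop_no_pat '%' '}' _ s5 (le_refl _)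
  have hfix : pvOnePass s6.toList = s6.toList := by
    apply pvOnePass_fix s6.toList.length s6.toList (le_refl _)
    intro a b hv hin
    rcases pvValid_cases hv with ⟨rfl, rfl⟩ | ⟨rfl, rfl⟩ | ⟨rfl, rfl⟩ | ⟨rfl, rfl⟩ |
      ⟨rfl, rfl⟩ | ⟨rfl, rfl⟩
    · exact n1 hin
    · exact n2 hin
    · exact n3 hin
    · exact n4 hin
    · exact n5 hin
    · exact n6 hin
  have hfin : s6.toList = (replace_latex_space_seperator_alt s).toList := by
    rw [← hfix, e6, e5, e4, e3, e2, e1]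
    simp [replace_latex_space_seperator_alt, pvOnePass]
  exact String.toList_inj.mp hfin
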